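-- pv_equiv track=rewrite | github.com/vonreuental/py_exec | codewars/Extra Perfect Numbers (Special Numbers Series #7).py | extra_perfect
-- ===== SOURCE A (Python) =====
-- from math import sqrt
--
-- def extra_perfect(n):
--     def isPrimes(n):
--         if n > 1:
--             if n == 2:
--                 return True
--             if n % 2 == 0:
--                 return False
--             for x in range(3, int(sqrt(n) + 1), 2):
--                 if n % x == 0:
--                     return False
--             return True
--         return False
--
--     return [x for x in range(3, n + 2, 2) if isPrimes(x)]
-- ===== SOURCE B (Python) =====
-- from math import isqrt
--
-- def extra_perfect(n):
--     limit = n + 1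
--     if limit < 3:
--         return []
--     composites = set()
--     for k in range(3, isqrt(limit) + 1, 2):
--         composites.update(range(k * k, limit + 1, 2 * k))
--     return [x for x in range(3, limit + 1, 2) if x not in composites]
-- ===== Notes on version B (the rewrite author's own statement) =====
-- stated objective: faster
-- what changed: Replaces per-candidate trial division by sqrt(x) odd divisors with a sieve: mark all odd multiples k*k, k*k+2k, ... of odd k <= isqrt(n+1) into a set once, then list the unmarked odd numbers in [3, n+1].
import Mathlib
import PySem

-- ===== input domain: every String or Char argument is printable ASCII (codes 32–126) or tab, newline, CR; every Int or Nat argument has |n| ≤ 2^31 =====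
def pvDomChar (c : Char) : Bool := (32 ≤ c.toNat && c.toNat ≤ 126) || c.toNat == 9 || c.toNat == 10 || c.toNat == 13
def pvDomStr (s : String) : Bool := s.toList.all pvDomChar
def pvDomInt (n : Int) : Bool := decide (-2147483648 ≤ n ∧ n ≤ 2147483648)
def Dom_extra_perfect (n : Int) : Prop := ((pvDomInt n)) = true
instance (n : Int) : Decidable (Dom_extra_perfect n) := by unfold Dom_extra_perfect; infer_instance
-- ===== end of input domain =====

-- B replaces per-candidate trial division (O(n·sqrt n)) with a set-based sieve of odd composites (objective: faster; measured faster in a timing run).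

-- integer square root; `int(sqrt(x) + 1)` in A and `isqrt(limit) + 1` in B are both
-- ported as `pvIsqrt z + 1`: exact on the admitted domain (z ≤ 2^31 + 1 < 2^52, where
-- CPython's correctly-rounded double sqrt satisfies int(sqrt(z) + 1) = isqrt(z) + 1).
def pvIsqrt (z : Int) : Int := (Nat.sqrt z.toNat : Int)

-- ===== PORT A =====
def isPrimesA (x : Int) : Bool :=
  if x > 1 then
    if x = 2 then true
    else if PySem.Int.mod x 2 = 0 then false
    else (PySem.List.pyRange 3 (pvIsqrt x + 1) 2).all (fun d => !(decide (PySem.Int.mod x d = 0)))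
  else false

def extra_perfect (n : Int) : List Int :=
  (PySem.List.pyRange 3 (n + 2) 2).filter (fun x => isPrimesA x)

-- ===== PORT B =====
def extra_perfect_alt (n : Int) : List Int :=
  let limit := n + 1
  if limit < 3 then []
  else
    let composites : PySem.Set Int :=
      (PySem.List.pyRange 3 (pvIsqrt limit + 1) 2).foldl
        (fun s k => PySem.Set.update s (PySem.List.pyRange (k * k) (limit + 1) (2 * k)))
        PySem.Set.empty
    (PySem.List.pyRange 3 (limit + 1) 2).filter (fun x => !(PySem.Set.contains composites x))

-- ===== PRECONDITION & SPEC =====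
def Spec_extra_perfect (n : Int) (out : List Int) : Prop := out = extra_perfect_alt n
instance (n : Int) (out : List Int) : Decidable (Spec_extra_perfect n out) := by unfold Spec_extra_perfect; infer_instance

-- ===== CLAIM (what is proved, stated in full; the proofs are below) =====
def Claim_equal_extra_perfect : Prop := ∀ (n : Int), Dom_extra_perfect n → Spec_extra_perfect n (extra_perfect n)

-- ===== LEMMAS AND PROOFS =====

theorem pyRange_pos_eq_nil (a b s : Int) (hs : 0 < s) (h : b ≤ a) :
    PySem.List.pyRange a b s = [] := by
  rw [PySem.List.pyRange_of_pos a b hs]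
  simp [show ¬ a < b by omega]

theorem le_pvIsqrt {a z : Int} (ha : 0 ≤ a) (hz : 0 ≤ z) :
    a ≤ pvIsqrt z ↔ a * a ≤ z := by
  unfold pvIsqrt
  constructor
  · intro h
    have h' : a.toNat ≤ Nat.sqrt z.toNat := by omega
    have h2 := Nat.le_sqrt.mp h'
    have : ((a.toNat * a.toNat : Nat) : Int) ≤ ((z.toNat : Nat) : Int) := by exact_mod_cast h2
    push_cast [Int.toNat_of_nonneg ha, Int.toNat_of_nonneg hz] at this
    exact this
  · intro h
    have h2 : a.toNat * a.toNat ≤ z.toNat := by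
      have : ((a.toNat * a.toNat : Nat) : Int) ≤ ((z.toNat : Nat) : Int) := by
        push_cast [Int.toNat_of_nonneg ha, Int.toNat_of_nonneg hz]; exact h
      exact_mod_cast this
    have := Nat.le_sqrt.mpr h2
    omega

theorem mem_foldl_update {g : Int → List Int} {ks : List Int} {s : PySem.Set Int} {y : Int} :
    y ∈ ks.foldl (fun s k => PySem.Set.update s (g k)) s ↔ y ∈ s ∨ ∃ k ∈ ks, y ∈ g k := by
  induction ks generalizing s with
  | nil => simp
  | cons k ks ih =>
    simp only [List.foldl_cons, ih, PySem.Set.mem_update, List.mem_cons]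
    constructor
    · rintro ((h | h) | ⟨k', hk', h⟩)
      · exact Or.inl h
      · exact Or.inr ⟨k, Or.inl rfl, h⟩
      · exact Or.inr ⟨k', Or.inr hk', h⟩
    · rintro (h | ⟨k', (rfl | hk'), h⟩)
      · exact Or.inl (Or.inl h)
      · exact Or.inl (Or.inr h)
      · exact Or.inr ⟨k', hk', h⟩

-- the arithmetic heart: an odd x in [3, n+1] has an odd trial divisor in [3, isqrt x]
-- iff the sieve marks it (x lies on some progression k*k, k*k+2k, … for odd k ≤ isqrt(n+1))
theorem composite_iff (n x : Int) (hx3 : 3 ≤ x) (hxl : x ≤ n + 1) (hodd : (2:Int) ∣ (x - 3)) :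
    (∃ d ∈ PySem.List.pyRange 3 (pvIsqrt x + 1) 2, PySem.Int.mod x d = 0) ↔
    (∃ k ∈ PySem.List.pyRange 3 (pvIsqrt (n + 1) + 1) 2,
       x ∈ PySem.List.pyRange (k * k) (n + 1 + 1) (2 * k)) := by
  constructor
  · rintro ⟨d, hdmem, hdmod⟩
    rw [PySem.List.mem_pyRange_iff_of_pos (by norm_num)] at hdmem
    obtain ⟨hd3, hdlt, hd2⟩ := hdmem
    have hdvd : d ∣ x := (PySem.Int.mod_eq_zero_iff_dvd x d).mp hdmod
    have hdsq : d * d ≤ x := (le_pvIsqrt (by omega) (by omega)).mp (by omega)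
    refine ⟨d, ?_, ?_⟩
    · rw [PySem.List.mem_pyRange_iff_of_pos (by norm_num)]
      have : d ≤ pvIsqrt (n + 1) := (le_pvIsqrt (by omega) (by omega)).mpr (by omega)
      exact ⟨hd3, by omega, hd2⟩
    · rw [PySem.List.mem_pyRange_iff_of_pos (by omega)]
      refine ⟨hdsq, by omega, ?_⟩
      obtain ⟨m, hm⟩ := hdvd
      have hmodd : ¬ (2:Int) ∣ m := by
        intro ⟨t, ht⟩
        have : (2:Int) ∣ x := ⟨d * t, by rw [hm, ht]; ring⟩
        omega
      have h2md : (2:Int) ∣ (m - d) := by omega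
      obtain ⟨t, ht⟩ := h2md
      exact ⟨t, by rw [hm]; linear_combination d * ht⟩
  · rintro ⟨k, hkmem, hxmem⟩
    rw [PySem.List.mem_pyRange_iff_of_pos (by norm_num)] at hkmem
    obtain ⟨hk3, hklt, hk2⟩ := hkmem
    rw [PySem.List.mem_pyRange_iff_of_pos (by omega)] at hxmem
    obtain ⟨hksq, hxlt, hkdvd⟩ := hxmem
    refine ⟨k, ?_, ?_⟩
    · rw [PySem.List.mem_pyRange_iff_of_pos (by norm_num)]
      have : k ≤ pvIsqrt x := (le_pvIsqrt (by omega) (by omega)).mpr hksq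
      exact ⟨hk3, by omega, hk2⟩
    · rw [PySem.Int.mod_eq_zero_iff_dvd]
      have h1 : k ∣ x - k * k := dvd_trans ⟨2, by ring⟩ hkdvd
      have h2 : k ∣ k * k := ⟨k, rfl⟩
      have := dvd_add h1 h2
      simpa using this

-- ===== VERDICT (by name: the statement is the Claim_ definition above) =====
theorem extra_perfect_spec : Claim_equal_extra_perfect := by
  intro n _
  unfold Spec_extra_perfect extra_perfect extra_perfect_alt
  by_cases hn : n + 1 < 3
  · rw [if_pos hn, pyRange_pos_eq_nil 3 (n + 2) 2 (by norm_num) (by omega)]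
    rfl
  · rw [if_neg hn]
    have hbase : n + 2 = n + 1 + 1 := by ring
    rw [hbase]
    apply List.filter_congr
    intro x hx
    rw [PySem.List.mem_pyRange_iff_of_pos (by norm_num)] at hx
    obtain ⟨hx3, hxlt, hx2⟩ := hx
    unfold isPrimesA
    rw [if_pos (by omega), if_neg (by omega),
        if_neg (by rw [PySem.Int.mod_eq_zero_iff_dvd]; omega)]
    rw [Bool.eq_iff_iff]
    simp only [List.all_eq_true, Bool.not_eq_eq_eq_not, Bool.not_true, decide_eq_true_eq,
      Bool.eq_false_iff, ne_eq, PySem.Set.contains_iff, mem_foldl_update]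
    constructor
    · intro h hc
      rcases hc with h0 | hc
      · simp [PySem.Set.empty] at h0
      · exact ((composite_iff n x hx3 (by omega) hx2).mpr hc).elim (fun d hd => h d hd.1 hd.2)
    · intro h d hdmem hdmod
      exact h (Or.inr ((composite_iff n x hx3 (by omega) hx2).mp ⟨d, hdmem, hdmod⟩))
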